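-- pv_equiv track=rewrite | github.com/yggdrasil-au/RemakeEngine | reverse_engineering/Source/txd/Export_txd copy 2.py | _part_bits_by_1
-- ===== SOURCE A (Python) =====
-- def _part_bits_by_1(n, BITS):
--     # Spread BITS of n by inserting 0s between bits.
--     # Example for 16-bit BITS=8 (part_bits1_by1 from common Morton code)
--     # n = (n ^ (n << 8)) & 0x00FF00FF  # Not needed for up to 16-bit width/height
--     # n = (n ^ (n << 4)) & 0x0F0F0F0F  # For up to 8 bits per coord (256x256)
--     # n = (n ^ (n << 2)) & 0x33333333  # For up to 4 bits per coord (16x16)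
--     # n = (n ^ (n << 1)) & 0x55555555  # For up to 2 bits per coord (4x4)
--
--     # Generic version for up to 16-bit coordinates (max texture dim 65536)
--     # Max val of n will be 2^16 - 1. Result needs 32 bits.
--     mask_shifts = []
--     if BITS > 8: mask_shifts.append((0x0000FF00, 0xFF0000FF, 8)) # Interleave groups of 8 bits
--     if BITS > 4: mask_shifts.append((0x00F000F0, 0xF00FF00F, 4)) # Interleave groups of 4 bits
--     if BITS > 2: mask_shifts.append((0x0C0C0C0C, 0xC30C30C3, 2)) # Interleave groups of 2 bits
--     if BITS > 1: mask_shifts.append((0x22222222, 0x49249249, 1)) # Interleave groups of 1 bit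
--
--     # Filter masks based on BITS actually needed for current coordinate value range
--     # Example: if max coordinate is 255 (8 bits), BITS = 8
--     # We need to spread these 8 bits into 16 positions for one coordinate in a 32-bit Morton index
--
--     # Simplified version adequate for texture coordinates up to 16-bits (65536 dim)
--     # Spreads BITS of n into 2*BITS positions
--     res = 0
--     for i in range(BITS):
--         res |= (n & (1 << i)) << i
--     return res
-- ===== SOURCE B (Python) =====
-- def _part_bits_by_1(n, BITS):
--     # Divide and conquer: split the BITS-wide bit range in half, spread each
--     # half recursively, and place the spread high half 2*h bit positions up.
--     def spread(m, k):
--         if k <= 0: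
--             return 0
--         if k == 1:
--             return m & 1
--         h = k // 2
--         return spread(m, h) + (spread(m >> h, k - h) << (2 * h))
--     return spread(n, BITS)
-- ===== Notes on version B (the rewrite author's own statement) =====
-- stated objective: faster
-- what changed: B replaces A's linear per-bit loop (mask n with 1<<i, shift, OR, for every i in range(BITS)) by a divide-and-conquer recursion that splits the bit range in half, spreads each half recursively and combines the halves with one shift and one addition, cutting total bignum work from O(BITS^2) to O(BITS log BITS) bit operations.
import Mathlib
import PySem

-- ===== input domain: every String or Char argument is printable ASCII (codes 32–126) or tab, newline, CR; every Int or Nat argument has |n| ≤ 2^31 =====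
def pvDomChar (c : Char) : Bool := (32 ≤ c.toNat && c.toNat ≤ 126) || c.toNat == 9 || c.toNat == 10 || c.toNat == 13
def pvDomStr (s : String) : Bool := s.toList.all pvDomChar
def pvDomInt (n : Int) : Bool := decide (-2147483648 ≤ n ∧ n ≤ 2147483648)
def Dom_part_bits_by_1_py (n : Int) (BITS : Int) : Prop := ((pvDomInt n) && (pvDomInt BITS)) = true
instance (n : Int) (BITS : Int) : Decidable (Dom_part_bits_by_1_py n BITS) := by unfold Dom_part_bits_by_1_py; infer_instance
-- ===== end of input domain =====

-- B spreads the bits by divide and conquer on the bit range instead of A's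
-- linear per-bit mask/shift/or loop; return values proved equal.

-- ===== PORT A =====
-- 'for i in range(BITS)' as fuel recursion on the remaining iteration count with the
-- running index i and accumulator res; body is res |= (n & (1 << i)) << i verbatim
-- (shift counts via i.toNat : Nat; i is nonnegative throughout the loop, where .toNat is exact).
def pvABody (n res i : Int) : Int :=
  PySem.Int.bor res ((PySem.Int.band n ((1 : Int) <<< i.toNat)) <<< i.toNat)

def pvALoop (n : Int) : Nat → Int → Int → Int
  | 0, _, res => res
  | k + 1, i, res => pvALoop n k (i + 1) (pvABody n res i)

def part_bits_by_1_py (n : Int) (BITS : Int) : Int :=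
  pvALoop n BITS.toNat 0 0

-- ===== PORT B =====
-- Source B's recursive spread(m, k): split the k-bit range at h = k // 2, recurse on
-- both halves, combine with one shift and one addition (shift counts via .toNat,
-- exact here since h ≥ 1 on the recursive branch).
def pvSpread (m : Int) (k : Int) : Int :=
  if _hk : k ≤ 0 then 0
  else if _h1 : k = 1 then PySem.Int.band m 1
  else
    let h := PySem.Int.floordiv k 2
    pvSpread m h + ((pvSpread (m >>> h.toNat) (k - h)) <<< (2 * h).toNat)
termination_by k.toNat
decreasing_by
  · have := PySem.Int.floordiv_eq_ediv_of_pos (a := k) (b := 2) (by omega)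
    omega
  · have := PySem.Int.floordiv_eq_ediv_of_pos (a := k) (b := 2) (by omega)
    omega

def part_bits_by_1_py_alt (n : Int) (BITS : Int) : Int :=
  pvSpread n BITS

-- ===== PRECONDITION & SPEC =====
def Spec_part_bits_by_1_py (n : Int) (BITS : Int) (out : Int) : Prop := out = part_bits_by_1_py_alt n BITS
instance (n : Int) (BITS : Int) (out : Int) : Decidable (Spec_part_bits_by_1_py n BITS out) := by unfold Spec_part_bits_by_1_py; infer_instance

-- ===== CLAIM (what is proved, stated in full; the proofs are below) =====
def Claim_equal_part_bits_by_1_py : Prop := ∀ (n : Int) (BITS : Int), Dom_part_bits_by_1_py n BITS → Spec_part_bits_by_1_py n BITS (part_bits_by_1_py n BITS)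

-- ===== LEMMAS AND PROOFS =====

-- the common mathematical value: sum of bit i of n times 4^i, i < k
def pvS : Nat → Int → Int
  | 0, _ => 0
  | k + 1, m => PySem.Int.band m 1 + 4 * pvS k (m >>> (1 : Nat))

theorem pv_shiftRight_pow (m : Int) (c : Nat) : m >>> c = m / 2 ^ c := by
  rw [Int.shiftRight_eq_div_pow]; norm_cast

-- bit extraction: n & 2^j == (n / 2^j) % 2 * 2^j, also for negative n
theorem pv_band_pow_nonneg (n : Int) (j : Nat) (hn : 0 ≤ n) :
    PySem.Int.band n ((2 : Int) ^ j) = n / 2 ^ j % 2 * 2 ^ j := by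
    rw [PySem.Int.band_of_nonneg hn (by positivity)]
    obtain ⟨a, rfl⟩ := Int.eq_ofNat_of_zero_le hn
    have h2 : ((2:Int) ^ j) = ((2 ^ j : Nat) : Int) := by push_cast; ring
    rw [h2, Int.toNat_natCast, Int.toNat_natCast, ← Int.natCast_ediv]
    have hN : a &&& 2 ^ j = a / 2 ^ j % 2 * 2 ^ j := by
      have := Nat.and_two_pow a j
      rw [Nat.testBit_eq_decide_div_mod_eq] at this
      rw [this]
      rcases Nat.mod_two_eq_zero_or_one (a / 2 ^ j) with h | h <;> simp [h]
    exact_mod_cast hN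

theorem pv_band_pow_neg (n : Int) (j : Nat) (hn : n < 0) :
    PySem.Int.band n ((2 : Int) ^ j) = n / 2 ^ j % 2 * 2 ^ j := by
    have hnn : ¬ (0 ≤ n) := by omega
    unfold PySem.Int.band
    rw [if_neg hnn, if_pos (by positivity : (0:Int) ≤ 2 ^ j)]
    set m : Nat := (-n - 1).toNat with hm
    have hnm : n = -(m : Int) - 1 := by omega
    have h2 : ((2:Int) ^ j) = ((2 ^ j : Nat) : Int) := by push_cast; ring
    -- Nat facts about bit j of m
    set q : Nat := m / 2 ^ j with hq
    set r : Nat := m % 2 ^ j with hr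
    have hmqr : m = q * 2 ^ j + r ∧ r < 2 ^ j := ⟨by rw [hq, hr, Nat.mul_comm]; exact (Nat.div_add_mod m (2^j)).symm, Nat.mod_lt _ (by positivity)⟩
    have hand : 2 ^ j &&& m = q % 2 * 2 ^ j := by
      rw [Nat.and_comm, Nat.and_two_pow, Nat.testBit_eq_decide_div_mod_eq, ← hq]
      rcases Nat.mod_two_eq_zero_or_one q with h | h <;> simp [h]
    -- Int division: n / 2^j = -q - 1
    have hdiv : n / 2 ^ j = -(q : Int) - 1 := by
      have h1 : n = (2 ^ j - (r:Int) - 1) + (-(q:Int) - 1) * 2 ^ j := by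
        rw [hnm]; push_cast [hmqr.1]; ring
      rw [h1, Int.add_mul_ediv_right _ _ (by positivity : (2:Int)^j ≠ 0),
        Int.ediv_eq_zero_of_lt (by omega) (by omega)]
      ring
    rw [hdiv, h2, Int.toNat_natCast, hand]
    have hmod : (-(q:Int) - 1) % 2 = 1 - (q:Int) % 2 := by omega
    rw [hmod]
    rcases Nat.mod_two_eq_zero_or_one q with h | h <;>
      · have hc : ((q:Int)) % 2 = (q % 2 : Nat) := by push_cast; ring
        rw [hc, h]
        push_cast [h]
        simp

theorem pv_band_pow (n : Int) (j : Nat) :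
    PySem.Int.band n ((2 : Int) ^ j) = n / 2 ^ j % 2 * 2 ^ j := by
  rcases (by omega : 0 ≤ n ∨ n < 0) with hn | hn
  · exact pv_band_pow_nonneg n j hn
  · exact pv_band_pow_neg n j hn

theorem pvS_nonneg_lt (k : Nat) (n : Int) : 0 ≤ pvS k n ∧ pvS k n < 4 ^ k := by
  induction k generalizing n with
  | zero => simp [pvS]
  | succ k ih =>
    have h1 := PySem.Int.band_one n
    have hb : 0 ≤ n % 2 ∧ n % 2 < 2 := ⟨Int.emod_nonneg n (by norm_num), Int.emod_lt_of_pos n (by norm_num)⟩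
    have hm2 : PySem.Int.mod n 2 = n % 2 := PySem.Int.mod_eq_emod_of_pos (by norm_num)
    have h2 := ih (n >>> (1 : Nat))
    simp only [pvS, h1, hm2, pow_succ]
    constructor <;> nlinarith [h2.1, h2.2, hb.1, hb.2]

-- splitting pvS at bit position a: low a bits, then the rest shifted down by a
theorem pvS_split (a b : Nat) (m : Int) :
    pvS (a + b) m = pvS a m + 4 ^ a * pvS b (m >>> a) := by
  induction a generalizing m with
  | zero => simp [pvS, pv_shiftRight_pow]
  | succ a ih =>
    have hsh : (m >>> (1 : Nat)) >>> a = m >>> (a + 1) := by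
      rw [pv_shiftRight_pow, pv_shiftRight_pow, pv_shiftRight_pow,
        Int.ediv_ediv_of_nonneg (by positivity : (0:Int) ≤ 2 ^ (1:Nat)),
        show (2:Int) ^ (1:Nat) = 2 by norm_num, ← pow_succ']
    have : a + 1 + b = (a + b) + 1 := by omega
    rw [this]
    show PySem.Int.band m 1 + 4 * pvS (a + b) (m >>> (1 : Nat)) = _
    rw [ih, hsh]
    show _ = PySem.Int.band m 1 + 4 * pvS a (m >>> (1 : Nat)) + 4 ^ (a + 1) * pvS b (m >>> (a + 1))
    rw [pow_succ]; ring

-- top-peel form of pvS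
theorem pvS_succ_top (k : Nat) (n : Int) :
    pvS (k + 1) n = pvS k n + n / 2 ^ k % 2 * 4 ^ k := by
  rw [pvS_split k 1 n]
  have h1 : pvS 1 (n >>> k) = (n >>> k) % 2 := by
    simp [pvS, PySem.Int.band_one]
  rw [h1, pv_shiftRight_pow]
  ring

-- or of a value below 4^k with a multiple-of-4^k bit is addition
theorem pv_bor_add (a c : Int) (k : Nat) (ha : 0 ≤ a) (hlt : a < 4 ^ k) (hc : c = 0 ∨ c = 1) :
    PySem.Int.bor a (c * 4 ^ k) = a + c * 4 ^ k := by
  rcases hc with h | h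
  · rw [h, zero_mul, add_zero, PySem.Int.bor_of_nonneg ha (le_refl 0)]
    simp [Int.toNat_of_nonneg ha]
  · rw [h, one_mul]
    rw [PySem.Int.bor_of_nonneg ha (by positivity)]
    have h4 : ((4:Int) ^ k) = ((4 ^ k : Nat) : Int) := by push_cast; ring
    have h2k : (4 ^ k : Nat) = 2 ^ (2 * k) := by rw [pow_mul]; norm_num
    have hb : a.toNat < 2 ^ (2 * k) := by
      have h' : (a.toNat : Int) < ((4 ^ k : Nat) : Int) := by
        rw [Int.toNat_of_nonneg ha, ← h4]; exact hlt
      rw [← h2k]; exact_mod_cast h'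
    have hor : a.toNat ||| (4 ^ k : Nat) = a.toNat + 4 ^ k := by
      have h5 := Nat.two_pow_add_eq_or_of_lt hb 1
      rw [Nat.mul_one] at h5
      rw [h2k, Nat.lor_comm, ← h5, Nat.add_comm]
    rw [h4, Int.toNat_natCast, hor]
    push_cast
    rw [Int.toNat_of_nonneg ha]

-- A's loop is the fold of its body over range(i, i+k)
theorem pvALoop_foldl (n : Int) (k : Nat) (i res : Int) :
    pvALoop n k i res = (PySem.List.pyRange i (i + k) 1).foldl (pvABody n) res := by
  induction k generalizing i res with
  | zero => rw [show i + (0:Nat) = i by simp, PySem.List.pyRange_one_eq_nil (le_refl i)]; rfl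
  | succ k ih =>
    rw [PySem.List.pyRange_one_cons (by omega : i < i + (k+1 : Nat)), List.foldl_cons]
    show pvALoop n k (i+1) _ = _
    rw [ih (i+1) _, show i + 1 + (k:Int) = i + ((k + 1 : Nat) : Int) by push_cast; ring]

-- A's fold equals pvS
theorem pv_fold_eq (n : Int) (k : Nat) :
    (PySem.List.pyRange 0 (k : Int) 1).foldl (pvABody n) 0 = pvS k n := by
  induction k with
  | zero => simp [pvS]
  | succ k ih =>
    have hsr : ((k : Int) + 1) = ((k + 1 : Nat) : Int) := by push_cast; ring
    rw [← hsr, PySem.List.pyRange_one_succ_right (by positivity), List.foldl_append, ih]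
    simp only [List.foldl_cons, List.foldl_nil]
    have h4 : (4 : Int) ^ k = 2 ^ k * 2 ^ k := by rw [← mul_pow]; norm_num
    have hbound := pvS_nonneg_lt k n
    have hbit : n / 2 ^ k % 2 = 0 ∨ n / 2 ^ k % 2 = 1 := Int.emod_two_eq_zero_or_one _
    unfold pvABody
    rw [Int.toNat_natCast, Int.shiftLeft_eq, Int.shiftLeft_eq, one_mul, pv_band_pow,
      show n / 2 ^ k % 2 * 2 ^ k * 2 ^ k = n / 2 ^ k % 2 * 4 ^ k by rw [h4]; ring,
      pv_bor_add _ _ k hbound.1 hbound.2 hbit, ← pvS_succ_top]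

-- B's divide and conquer equals pvS on its bit count
theorem pvSpread_eq : ∀ (K : Nat) (m k : Int), k.toNat ≤ K → pvSpread m k = pvS k.toNat m := by
  intro K
  induction K with
  | zero =>
    intro m k hK
    rw [pvSpread]
    have hk : k ≤ 0 := by omega
    rw [dif_pos hk]
    have : k.toNat = 0 := by omega
    rw [this]; rfl
  | succ K ih =>
    intro m k hK
    rw [pvSpread]
    by_cases hk : k ≤ 0
    · rw [dif_pos hk]
      have : k.toNat = 0 := by omega
      rw [this]; rfl
    · rw [dif_neg hk]
      by_cases h1 : k = 1
      · rw [dif_pos h1, h1]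
        show _ = pvS 1 m
        simp [pvS]
      · rw [dif_neg h1]
        have hfd : PySem.Int.floordiv k 2 = k / 2 :=
          PySem.Int.floordiv_eq_ediv_of_pos (by norm_num)
        show pvSpread m (PySem.Int.floordiv k 2) +
            ((pvSpread (m >>> (PySem.Int.floordiv k 2).toNat) (k - PySem.Int.floordiv k 2)) <<<
              (2 * PySem.Int.floordiv k 2).toNat) = pvS k.toNat m
        set h : Int := PySem.Int.floordiv k 2 with hh
        have hhb : 1 ≤ h ∧ h < k := by omega
        have hsum : h.toNat + (k - h).toNat = k.toNat := by omega
        rw [ih m h (by omega), ih (m >>> h.toNat) (k - h) (by omega)]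
        rw [← hsum, pvS_split]
        have h2h : (2 * h).toNat = 2 * h.toNat := by omega
        rw [Int.shiftLeft_eq, h2h, pow_mul]
        have : ((2:Int) ^ 2) = 4 := by norm_num
        rw [this]; ring

-- ===== VERDICT (by name: the statement is the Claim_ definition above) =====
theorem part_bits_by_1_py_spec : Claim_equal_part_bits_by_1_py := by
  intro n BITS _
  unfold Spec_part_bits_by_1_py part_bits_by_1_py part_bits_by_1_py_alt
  rw [pvALoop_foldl, zero_add, pv_fold_eq, pvSpread_eq BITS.toNat n BITS (le_refl _)]
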